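-- pv_equiv track=rewrite | github.com/katrinafyi/aoc-2019 | day16_solve.py | apply_pattern_old
-- ===== SOURCE A (Python) =====
-- def apply_pattern_old(vec, n):
--     out = 0
--     start = n
--     period = 4 * (n+1)
--     for i in range(start, len(vec), period):
--         for j in range(n+1):
--             if i+j >= len(vec): break
--             out += vec[i+j]
--     for i in range(start + period // 2, len(vec), period):
--         for j in range(n+1):
--             if i+j >= len(vec): break
--             out -= vec[i+j]
--     return out
-- ===== SOURCE B (Python) =====
-- def apply_pattern_old(vec, n):
--     # prefix sums: P[k] = vec[0] + ... + vec[k-1]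
--     P = [0]
--     acc = 0
--     for x in vec:
--         acc += x
--         P.append(acc)
--     L = len(vec)
--     period = 4 * (n + 1)
--     out = 0
--     for i in range(n, L, period):
--         out += P[min(i + n + 1, L)] - P[i]
--     for i in range(n + period // 2, L, period):
--         out -= P[min(i + n + 1, L)] - P[i]
--     return out
-- ===== Notes on version B (the rewrite author's own statement) =====
-- stated objective: alternative
-- what changed: Replaced A's inner element-by-element block-summation loops (with their break) by a prefix-sum table built once, so each signed block becomes an O(1) range query P[min(i+n+1,len)]-P[i].
import Mathlib
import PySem

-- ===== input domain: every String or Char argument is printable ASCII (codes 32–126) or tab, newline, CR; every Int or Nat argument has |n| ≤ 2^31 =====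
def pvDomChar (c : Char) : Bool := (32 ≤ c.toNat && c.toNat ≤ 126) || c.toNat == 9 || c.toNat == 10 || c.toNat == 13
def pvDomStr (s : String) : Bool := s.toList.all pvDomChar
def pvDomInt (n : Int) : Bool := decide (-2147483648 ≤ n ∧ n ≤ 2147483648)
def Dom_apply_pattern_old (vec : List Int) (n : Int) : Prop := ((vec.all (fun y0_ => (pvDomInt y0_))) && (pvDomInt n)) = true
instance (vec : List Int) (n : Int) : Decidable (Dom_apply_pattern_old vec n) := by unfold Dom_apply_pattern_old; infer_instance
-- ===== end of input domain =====

-- B replaces A's inner element-by-element block-summation loops with prefix-sum range queries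
-- (alternative decomposition; the outer block iteration is kept).

-- ===== PORT A =====
-- literal transliteration of A: two outer range loops, each running an inner loop over
-- range(n+1) that carries a 'broken' flag (the break); vec[i+j] is accessed only when
-- i+j < len(vec), so pyGetD is exact there.
def apply_pattern_old (vec : List Int) (n : Int) : Int :=
  let L : Int := (vec.length : Int)
  let period : Int := 4 * (n + 1)
  let out1 : Int :=
    (PySem.List.pyRange n L period).foldl (fun out i =>
      ((PySem.List.pyRange 0 (n + 1) 1).foldl (fun (st : Int × Bool) j =>
          if st.2 then st
          else if L ≤ i + j then (st.1, true)
          else (st.1 + PySem.List.pyGetD vec (i + j) 0, false)) (out, false)).1) 0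
  (PySem.List.pyRange (n + PySem.Int.floordiv period 2) L period).foldl (fun out i =>
      ((PySem.List.pyRange 0 (n + 1) 1).foldl (fun (st : Int × Bool) j =>
          if st.2 then st
          else if L ≤ i + j then (st.1, true)
          else (st.1 - PySem.List.pyGetD vec (i + j) 0, false)) (out, false)).1) out1

-- ===== PORT B =====
-- literal transliteration of Source B: one fold builds the prefix-sum table P (list so far,
-- running sum); each outer loop then adds/subtracts the range query P[min(i+n+1,L)] - P[i].
def apply_pattern_old_alt (vec : List Int) (n : Int) : Int :=
  let P : List Int :=
    (vec.foldl (fun (s : List Int × Int) x => (s.1 ++ [s.2 + x], s.2 + x)) ([0], 0)).1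
  let L : Int := (vec.length : Int)
  let period : Int := 4 * (n + 1)
  let out1 : Int :=
    (PySem.List.pyRange n L period).foldl (fun out i =>
      out + (PySem.List.pyGetD P (min (i + n + 1) L) 0 - PySem.List.pyGetD P i 0)) 0
  (PySem.List.pyRange (n + PySem.Int.floordiv period 2) L period).foldl (fun out i =>
      out - (PySem.List.pyGetD P (min (i + n + 1) L) 0 - PySem.List.pyGetD P i 0)) out1

-- ===== PRECONDITION & SPEC =====
-- Pre_ excludes only n = -1, where the Python A raises ValueError (range() step 0).
def Pre_apply_pattern_old (vec : List Int) (n : Int) : Prop := n ≠ -1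
instance (vec : List Int) (n : Int) : Decidable (Pre_apply_pattern_old vec n) := by
  unfold Pre_apply_pattern_old; infer_instance

def pvWitness_apply_pattern_old : List Int × Int := ([1, 2, 3, 4, 5, 6], 1)

def Spec_apply_pattern_old (vec : List Int) (n : Int) (out : Int) : Prop := out = apply_pattern_old_alt vec n
instance (vec : List Int) (n : Int) (out : Int) : Decidable (Spec_apply_pattern_old vec n out) := by unfold Spec_apply_pattern_old; infer_instance

-- ===== CLAIM (what is proved, stated in full; the proofs are below) =====
def Claim_equal_apply_pattern_old : Prop := ∀ (vec : List Int) (n : Int), Dom_apply_pattern_old vec n → Pre_apply_pattern_old vec n → Spec_apply_pattern_old vec n (apply_pattern_old vec n)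

-- ===== LEMMAS AND PROOFS =====

-- a pyRange with negative step and start ≤ stop is empty (both outer loops for n ≤ -2)
lemma pv_pyRange_neg_empty (a b s : Int) (hs : s < 0) (hab : a ≤ b) :
    PySem.List.pyRange a b s = [] := by
  unfold PySem.List.pyRange
  rw [if_neg (by omega), if_neg (by omega), if_neg (by omega)]
  simp

-- the prefix fold of Source B, fully generalized over the accumulator
lemma pv_prefix_fold (vec : List Int) : ∀ (A0 : List Int) (s0 : Int),
    vec.foldl (fun (s : List Int × Int) x => (s.1 ++ [s.2 + x], s.2 + x)) (A0, s0)
      = (A0 ++ (List.range vec.length).map (fun k => s0 + (vec.take (k + 1)).sum),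
         s0 + vec.sum) := by
  induction vec with
  | nil => simp
  | cons x xs ih =>
    intro A0 s0
    simp only [List.foldl_cons, ih, List.length_cons, List.range_succ_eq_map,
      List.map_cons, List.map_map]
    refine Prod.ext ?_ (by simp [add_assoc])
    simp [Function.comp_def, add_assoc, List.append_assoc]

-- P is the table of partial sums of vec
lemma pv_prefix_eq (vec : List Int) :
    (vec.foldl (fun (s : List Int × Int) x => (s.1 ++ [s.2 + x], s.2 + x)) ([0], 0)).1
      = (List.range (vec.length + 1)).map (fun k => (vec.take k).sum) := by
  rw [pv_prefix_fold]
  simp [List.range_succ_eq_map, List.map_map, Function.comp_def]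

-- reading the table at 0 ≤ j ≤ len
lemma pv_P_get (vec : List Int) (j : Int) (h0 : 0 ≤ j) (hj : j ≤ (vec.length : Int)) :
    PySem.List.pyGetD ((List.range (vec.length + 1)).map (fun k => (vec.take k).sum)) j 0
      = (vec.take j.toNat).sum := by
  rw [PySem.List.pyGetD_eq_getElem _ _ h0 (by simp; omega)]
  simp

-- A's inner break-loop (adding), characterized: it sums the clamped block and reports
-- whether the break fired
lemma pv_inner_add (vec : List Int) (i : Int) (hi0 : 0 ≤ i) (hiL : i < (vec.length : Int))
    (k : Nat) (out : Int) :
    (PySem.List.pyRange 0 (k : Int) 1).foldl (fun (st : Int × Bool) j =>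
        if st.2 then st
        else if (vec.length : Int) ≤ i + j then (st.1, true)
        else (st.1 + PySem.List.pyGetD vec (i + j) 0, false)) (out, false)
      = (out + ((vec.drop i.toNat).take k).sum, decide ((vec.length : Int) < i + k)) := by
  induction k with
  | zero =>
    rw [PySem.List.pyRange_one_eq_nil (by omega)]
    simp
    omega
  | succ k ih =>
    have hcast : ((k + 1 : Nat) : Int) = (k : Int) + 1 := by push_cast; ring
    rw [hcast, PySem.List.pyRange_one_succ_right (by omega), List.foldl_append, ih]
    have hlen : (vec.drop i.toNat).length = vec.length - i.toNat := by simp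
    simp only [List.foldl_cons, List.foldl_nil]
    by_cases h1 : (vec.length : Int) < i + k
    · rw [decide_eq_true h1]
      have htk : (vec.drop i.toNat).take (k+1) = (vec.drop i.toNat).take k := by
        rw [List.take_of_length_le (by omega), List.take_of_length_le (by omega)]
      rw [htk, if_pos rfl, decide_eq_true (by omega : (vec.length : Int) < i + ((k:Int)+1))]
    · rw [decide_eq_false (by omega), if_neg (by decide : ¬ (false = true))]
      by_cases h2 : (vec.length : Int) ≤ i + k
      · have htk : (vec.drop i.toNat).take (k+1) = (vec.drop i.toNat).take k := by
          rw [List.take_of_length_le (by omega), List.take_of_length_le (by omega)]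
        rw [htk, if_pos h2, decide_eq_true (by omega : (vec.length : Int) < i + ((k:Int)+1))]
      · have hlt : i.toNat + k < vec.length := by omega
        rw [if_neg h2]
        have hget : PySem.List.pyGetD vec (i + k) 0 = vec[i.toNat + k] := by
          rw [PySem.List.pyGetD_eq_getElem _ _ (by omega) (by omega)]
          congr 1
          omega
        have hsum : ((vec.drop i.toNat).take (k+1)).sum
            = ((vec.drop i.toNat).take k).sum + vec[i.toNat + k] := by
          rw [List.sum_take_succ _ _ (by omega)]
          congr 1
          rw [List.getElem_drop]
        rw [hget, hsum, decide_eq_false (by omega : ¬ (vec.length : Int) < i + ((k:Int)+1))]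
        rw [Prod.mk.injEq]
        exact ⟨by ring, rfl⟩

-- A's inner break-loop (subtracting), characterized
lemma pv_inner_sub (vec : List Int) (i : Int) (hi0 : 0 ≤ i) (hiL : i < (vec.length : Int))
    (k : Nat) (out : Int) :
    (PySem.List.pyRange 0 (k : Int) 1).foldl (fun (st : Int × Bool) j =>
        if st.2 then st
        else if (vec.length : Int) ≤ i + j then (st.1, true)
        else (st.1 - PySem.List.pyGetD vec (i + j) 0, false)) (out, false)
      = (out - ((vec.drop i.toNat).take k).sum, decide ((vec.length : Int) < i + k)) := by
  induction k with
  | zero =>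
    rw [PySem.List.pyRange_one_eq_nil (by omega)]
    simp
    omega
  | succ k ih =>
    have hcast : ((k + 1 : Nat) : Int) = (k : Int) + 1 := by push_cast; ring
    rw [hcast, PySem.List.pyRange_one_succ_right (by omega), List.foldl_append, ih]
    have hlen : (vec.drop i.toNat).length = vec.length - i.toNat := by simp
    simp only [List.foldl_cons, List.foldl_nil]
    by_cases h1 : (vec.length : Int) < i + k
    · rw [decide_eq_true h1]
      have htk : (vec.drop i.toNat).take (k+1) = (vec.drop i.toNat).take k := by
        rw [List.take_of_length_le (by omega), List.take_of_length_le (by omega)]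
      rw [htk, if_pos rfl, decide_eq_true (by omega : (vec.length : Int) < i + ((k:Int)+1))]
    · rw [decide_eq_false (by omega), if_neg (by decide : ¬ (false = true))]
      by_cases h2 : (vec.length : Int) ≤ i + k
      · have htk : (vec.drop i.toNat).take (k+1) = (vec.drop i.toNat).take k := by
          rw [List.take_of_length_le (by omega), List.take_of_length_le (by omega)]
        rw [htk, if_pos h2, decide_eq_true (by omega : (vec.length : Int) < i + ((k:Int)+1))]
      · have hlt : i.toNat + k < vec.length := by omega
        rw [if_neg h2]
        have hget : PySem.List.pyGetD vec (i + k) 0 = vec[i.toNat + k] := by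
          rw [PySem.List.pyGetD_eq_getElem _ _ (by omega) (by omega)]
          congr 1
          omega
        have hsum : ((vec.drop i.toNat).take (k+1)).sum
            = ((vec.drop i.toNat).take k).sum + vec[i.toNat + k] := by
          rw [List.sum_take_succ _ _ (by omega)]
          congr 1
          rw [List.getElem_drop]
        rw [hget, hsum, decide_eq_false (by omega : ¬ (vec.length : Int) < i + ((k:Int)+1))]
        rw [Prod.mk.injEq]
        exact ⟨by ring, rfl⟩

-- the prefix difference equals the clamped block sum
lemma pv_range_query (vec : List Int) (i m : Int) (hi0 : 0 ≤ i) (hiL : i < (vec.length : Int))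
    (hm : 0 ≤ m) :
    (vec.take (min (i + m) (vec.length : Int)).toNat).sum - (vec.take i.toNat).sum
      = ((vec.drop i.toNat).take m.toNat).sum := by
  have h1 : (min (i + m) (vec.length : Int)).toNat = min (i.toNat + m.toNat) vec.length := by omega
  have h2 : vec.take (min (i.toNat + m.toNat) vec.length) = vec.take (i.toNat + m.toNat) := by
    rcases Nat.le_total (i.toNat + m.toNat) vec.length with h | h
    · rw [min_eq_left h]
    · rw [min_eq_right h, List.take_length, List.take_of_length_le h]
  rw [h1, h2, List.take_add, List.sum_append]
  ring

-- ===== VERDICT (by name: the statement is the Claim_ definition above) =====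
theorem apply_pattern_old_spec : Claim_equal_apply_pattern_old := by
  intro vec n _ hn
  unfold Pre_apply_pattern_old at hn
  unfold Spec_apply_pattern_old
  unfold apply_pattern_old apply_pattern_old_alt
  dsimp only
  rw [pv_prefix_eq]
  set P := (List.range (vec.length + 1)).map (fun k => (vec.take k).sum) with hP
  set L : Int := (vec.length : Int) with hL
  have hL0 : 0 ≤ L := Int.natCast_nonneg _
  have hfd2 : PySem.Int.floordiv (4 * (n + 1)) 2 = 2 * (n + 1) := by
    rw [PySem.Int.floordiv_eq_ediv_of_pos (by norm_num)]; omega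
  by_cases hpos : 0 ≤ n
  · have hper : (0:Int) < 4 * (n + 1) := by omega
    have hk : (n + 1 : Int) = (((n + 1).toNat : Nat) : Int) := by omega
    have key_add : ∀ (out i : Int), 0 ≤ i → i < L →
        ((PySem.List.pyRange 0 (n + 1) 1).foldl (fun (st : Int × Bool) j =>
            if st.2 then st
            else if L ≤ i + j then (st.1, true)
            else (st.1 + PySem.List.pyGetD vec (i + j) 0, false)) (out, false)).1
          = out + (PySem.List.pyGetD P (min (i + n + 1) L) 0 - PySem.List.pyGetD P i 0) := by
      intro out i h0 h1
      rw [hk, pv_inner_add vec i h0 h1]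
      have hm1 : 0 ≤ min (i + n + 1) L := by omega
      have hm2 : min (i + n + 1) L ≤ L := by omega
      rw [hP, pv_P_get vec _ hm1 hm2, pv_P_get vec i h0 (by omega)]
      have hassoc : i + n + 1 = i + (n + 1) := by ring
      rw [hassoc, pv_range_query vec i (n + 1) h0 h1 (by omega)]
    have key_sub : ∀ (out i : Int), 0 ≤ i → i < L →
        ((PySem.List.pyRange 0 (n + 1) 1).foldl (fun (st : Int × Bool) j =>
            if st.2 then st
            else if L ≤ i + j then (st.1, true)
            else (st.1 - PySem.List.pyGetD vec (i + j) 0, false)) (out, false)).1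
          = out - (PySem.List.pyGetD P (min (i + n + 1) L) 0 - PySem.List.pyGetD P i 0) := by
      intro out i h0 h1
      rw [hk, pv_inner_sub vec i h0 h1]
      have hm1 : 0 ≤ min (i + n + 1) L := by omega
      have hm2 : min (i + n + 1) L ≤ L := by omega
      rw [hP, pv_P_get vec _ hm1 hm2, pv_P_get vec i h0 (by omega)]
      have hassoc : i + n + 1 = i + (n + 1) := by ring
      rw [hassoc, pv_range_query vec i (n + 1) h0 h1 (by omega)]
    have e1 : (PySem.List.pyRange n L (4 * (n + 1))).foldl (fun out i =>
        ((PySem.List.pyRange 0 (n + 1) 1).foldl (fun (st : Int × Bool) j =>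
            if st.2 then st
            else if L ≤ i + j then (st.1, true)
            else (st.1 + PySem.List.pyGetD vec (i + j) 0, false)) (out, false)).1) 0
        = (PySem.List.pyRange n L (4 * (n + 1))).foldl (fun out i =>
            out + (PySem.List.pyGetD P (min (i + n + 1) L) 0 - PySem.List.pyGetD P i 0)) 0 := by
      apply PySem.List.foldl_congr_mem
      intro out i hi
      rw [PySem.List.mem_pyRange_iff_of_pos hper] at hi
      exact key_add out i (by omega) hi.2.1
    rw [e1]
    apply PySem.List.foldl_congr_mem
    intro out i hi
    rw [PySem.List.mem_pyRange_iff_of_pos hper] at hi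
    rw [hfd2] at hi
    exact key_sub out i (by omega) hi.2.1
  · have hneg : n ≤ -2 := by omega
    rw [pv_pyRange_neg_empty n L (4 * (n + 1)) (by omega) (by omega)]
    rw [hfd2, pv_pyRange_neg_empty (n + 2 * (n + 1)) L (4 * (n + 1)) (by omega) (by omega)]
    simp
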